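-- pv_equiv track=rewrite | github.com/purple-phoenix/dailyprogrammer | python_files/project_374_game_of_blobs/game_of_blobs.py | update_observed_blobs
-- ===== SOURCE A (Python) =====
-- from typing import Tuple, List, Optional, Callable
--
-- Blob = Tuple[int, int, int]
--
-- def update_observed_blobs(new_blob: Blob, already_observed_blobs) -> List[Blob]:
--     if not already_observed_blobs:
--         return [new_blob]
--     observed_blob = already_observed_blobs[0]
--     rest_of_observed_blobs = already_observed_blobs[1:]
--     if positions_equal(new_blob, observed_blob):
--         merged_blob = merge_two_blobs(new_blob, observed_blob)
--         return update_observed_blobs(merged_blob, rest_of_observed_blobs)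
--     else:
--         return [observed_blob] + update_observed_blobs(new_blob, rest_of_observed_blobs)
--
-- def positions_equal(blob_a: Blob, blob_b: Blob) -> bool:
--     return blob_a[0] == blob_b[0] and blob_a[1] == blob_b[1]
--
-- def merge_two_blobs(blob_a: Blob, blob_b: Blob) -> Blob:
--     return blob_a[0], blob_b[1], (blob_a[2] + blob_b[2])
-- ===== SOURCE B (Python) =====
-- def positions_equal(blob_a, blob_b):
--     return blob_a[0] == blob_b[0] and blob_a[1] == blob_b[1]
--
-- def update_observed_blobs(new_blob, already_observed_blobs):
--     kept = [b for b in already_observed_blobs if not positions_equal(new_blob, b)]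
--     matches = [b for b in already_observed_blobs if positions_equal(new_blob, b)]
--     if not matches:
--         return kept + [new_blob]
--     total = new_blob[2] + sum(b[2] for b in matches)
--     return kept + [(new_blob[0], new_blob[1], total)]
-- ===== Notes on version B (the rewrite author's own statement) =====
-- stated objective: simpler
-- what changed: A's single recursive merge-and-rebuild traversal (re-merging the accumulating blob element by element) is replaced by two flat passes: filter out the blobs at new_blob's position, sum their sizes once, and append one merged blob.
import Mathlib
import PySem

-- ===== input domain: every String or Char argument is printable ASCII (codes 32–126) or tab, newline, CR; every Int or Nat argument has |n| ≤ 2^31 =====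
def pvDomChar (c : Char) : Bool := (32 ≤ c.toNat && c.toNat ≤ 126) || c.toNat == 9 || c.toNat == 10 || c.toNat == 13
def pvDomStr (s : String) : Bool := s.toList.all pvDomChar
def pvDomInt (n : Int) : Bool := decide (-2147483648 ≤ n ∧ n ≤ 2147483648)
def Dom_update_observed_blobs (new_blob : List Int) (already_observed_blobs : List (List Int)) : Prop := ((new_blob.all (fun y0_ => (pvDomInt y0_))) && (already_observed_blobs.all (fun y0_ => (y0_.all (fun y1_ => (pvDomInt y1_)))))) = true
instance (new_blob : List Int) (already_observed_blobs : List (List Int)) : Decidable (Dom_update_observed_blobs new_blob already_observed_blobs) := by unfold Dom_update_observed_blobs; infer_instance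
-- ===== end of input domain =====

-- B replaces A's single recursive merge-and-rebuild traversal by two flat passes
-- (filter out same-position blobs, sum their sizes once, append one merged blob): simpler decomposition, same cost.


-- ===== PORT A =====
-- positions_equal: blob_a[0] == blob_b[0] and blob_a[1] == blob_b[1]
-- (Python short-circuits the `and`; inside Pre_ every index the Python actually
-- evaluates is in range, so the total pyGet? comparison computes the same Bool.)
def positionsEqual (blob_a blob_b : List Int) : Bool :=
  (PySem.List.pyGet? blob_a 0 == PySem.List.pyGet? blob_b 0) &&
  (PySem.List.pyGet? blob_a 1 == PySem.List.pyGet? blob_b 1)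

-- merge_two_blobs: (blob_a[0], blob_b[1], blob_a[2] + blob_b[2]); all indices in range inside Pre_
def mergeTwoBlobs (blob_a blob_b : List Int) : List Int :=
  [PySem.List.pyGetD blob_a 0 0, PySem.List.pyGetD blob_b 1 0,
   PySem.List.pyGetD blob_a 2 0 + PySem.List.pyGetD blob_b 2 0]

def update_observed_blobs (new_blob : List Int) (already_observed_blobs : List (List Int)) : List (List Int) :=
  match already_observed_blobs with
  | [] => [new_blob]
  | observed_blob :: rest_of_observed_blobs =>
    if positionsEqual new_blob observed_blob then
      update_observed_blobs (mergeTwoBlobs new_blob observed_blob) rest_of_observed_blobs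
    else
      observed_blob :: update_observed_blobs new_blob rest_of_observed_blobs

-- ===== PORT B =====
def positionsEqualB (blob_a blob_b : List Int) : Bool :=
  (PySem.List.pyGet? blob_a 0 == PySem.List.pyGet? blob_b 0) &&
  (PySem.List.pyGet? blob_a 1 == PySem.List.pyGet? blob_b 1)

def update_observed_blobs_alt (new_blob : List Int) (already_observed_blobs : List (List Int)) : List (List Int) :=
  let kept := already_observed_blobs.filter (fun b => !(positionsEqualB new_blob b))
  let matched := already_observed_blobs.filter (fun b => positionsEqualB new_blob b)
  if matched.isEmpty then kept ++ [new_blob]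
  else kept ++ [[PySem.List.pyGetD new_blob 0 0, PySem.List.pyGetD new_blob 1 0,
                 PySem.List.pyGetD new_blob 2 0 +
                   (matched.map (fun b => PySem.List.pyGetD b 2 0)).sum]]

-- ===== PRECONDITION & SPEC =====
-- Pre_ excludes exactly the inputs on which the Python A raises IndexError: some observed
-- blob (or new_blob) is too short for an index the traversal actually evaluates.
def Pre_update_observed_blobs (new_blob : List Int) (already_observed_blobs : List (List Int)) : Prop :=
  ∀ b ∈ already_observed_blobs,
    new_blob ≠ [] ∧ b ≠ [] ∧
    (new_blob.take 1 = b.take 1 → 2 ≤ new_blob.length ∧ 2 ≤ b.length) ∧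
    (2 ≤ new_blob.length → new_blob.take 2 = b.take 2 → 3 ≤ new_blob.length ∧ 3 ≤ b.length)
instance (new_blob : List Int) (already_observed_blobs : List (List Int)) : Decidable (Pre_update_observed_blobs new_blob already_observed_blobs) := by unfold Pre_update_observed_blobs; infer_instance

def pvWitness_update_observed_blobs : List Int × List (List Int) := ([1, 2, 3], [[1, 2, 4], [5, 6, 7]])

def Spec_update_observed_blobs (new_blob : List Int) (already_observed_blobs : List (List Int)) (out : List (List Int)) : Prop := out = update_observed_blobs_alt new_blob already_observed_blobs
instance (new_blob : List Int) (already_observed_blobs : List (List Int)) (out : List (List Int)) : Decidable (Spec_update_observed_blobs new_blob already_observed_blobs out) := by unfold Spec_update_observed_blobs; infer_instance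

-- ===== CLAIM (what is proved, stated in full; the proofs are below) =====
def Claim_equal_update_observed_blobs : Prop := ∀ (new_blob : List Int) (already_observed_blobs : List (List Int)), Dom_update_observed_blobs new_blob already_observed_blobs → Pre_update_observed_blobs new_blob already_observed_blobs → Spec_update_observed_blobs new_blob already_observed_blobs (update_observed_blobs new_blob already_observed_blobs)

-- ===== LEMMAS AND PROOFS =====

lemma pyGet_one_cons (a b : Int) (t : List Int) : PySem.List.pyGet? (a::b::t) 1 = some b := by
  simp [PySem.List.pyGet?, PySem.List.pyIdx?]

lemma pyGet_two_cons (a b c : Int) (t : List Int) : PySem.List.pyGet? (a::b::c::t) 2 = some c := by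
  simp [PySem.List.pyGet?, PySem.List.pyIdx?]
  rw [if_pos (by omega)]
  rfl

lemma posEqB_cons2 (a b : Int) (t : List Int) (x : List Int) :
    positionsEqualB (a::b::t) x
      = ((some a == PySem.List.pyGet? x 0) && (some b == PySem.List.pyGet? x 1)) := by
  simp [positionsEqualB, PySem.List.pyGet?_zero_cons]

lemma alt_cons_no_match (new o : List Int) (rest : List (List Int))
    (h : positionsEqualB new o = false) :
    update_observed_blobs_alt new (o :: rest) = o :: update_observed_blobs_alt new rest := by
  simp only [update_observed_blobs_alt, List.filter_cons, h, Bool.not_false, if_true,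
    Bool.false_eq_true, if_false]
  split <;> simp

lemma main_equiv : ∀ (obs : List (List Int)) (new : List Int),
    Pre_update_observed_blobs new obs →
    update_observed_blobs new obs = update_observed_blobs_alt new obs := by
  intro obs
  induction obs with
  | nil =>
    intro new _
    simp [update_observed_blobs, update_observed_blobs_alt]
  | cons o rest ih =>
    intro new hpre
    obtain ⟨hn, ho, h1, h2⟩ := hpre o (by simp)
    have hrest : Pre_update_observed_blobs new rest := fun b hb => hpre b (by simp [hb])
    by_cases hp : positionsEqual new o = true
    · -- match case: both heads exist and agree, lengths are ≥ 3
      obtain ⟨n0, nt, rfl⟩ : ∃ n0 nt, new = n0 :: nt := by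
        cases new with | nil => exact absurd rfl hn | cons a t => exact ⟨a, t, rfl⟩
      obtain ⟨o0, ot, rfl⟩ : ∃ o0 ot, o = o0 :: ot := by
        cases o with | nil => exact absurd rfl ho | cons a t => exact ⟨a, t, rfl⟩
      have hp0 := hp
      simp only [positionsEqual, PySem.List.pyGet?_zero_cons, Bool.and_eq_true, beq_iff_eq,
        Option.some.injEq] at hp0
      have h00 : n0 = o0 := hp0.1
      have hlen2 := h1 (by simp [h00])
      obtain ⟨n1, nt1, rfl⟩ : ∃ n1 t, nt = n1 :: t := by
        cases nt with | nil => simp at hlen2 | cons a t => exact ⟨a, t, rfl⟩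
      obtain ⟨o1, ot1, rfl⟩ : ∃ o1 t, ot = o1 :: t := by
        cases ot with | nil => simp at hlen2 | cons a t => exact ⟨a, t, rfl⟩
      have hp1 := hp
      simp only [positionsEqual, PySem.List.pyGet?_zero_cons, pyGet_one_cons,
        Bool.and_eq_true, beq_iff_eq, Option.some.injEq] at hp1
      have h11 : n1 = o1 := hp1.2
      have hlen3 := h2 (by simp) (by simp [h00, h11])
      obtain ⟨n2, nt2, rfl⟩ : ∃ n2 t, nt1 = n2 :: t := by
        cases nt1 with | nil => simp at hlen3 | cons a t => exact ⟨a, t, rfl⟩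
      obtain ⟨o2, ot2, rfl⟩ : ∃ o2 t, ot1 = o2 :: t := by
        cases ot1 with | nil => simp at hlen3 | cons a t => exact ⟨a, t, rfl⟩
      subst h00 h11
      -- A takes the merge branch
      have hA : update_observed_blobs (n0 :: n1 :: n2 :: nt2) ((n0 :: n1 :: o2 :: ot2) :: rest)
          = update_observed_blobs (mergeTwoBlobs (n0 :: n1 :: n2 :: nt2) (n0 :: n1 :: o2 :: ot2)) rest := by
        simp [update_observed_blobs, hp]
      have hmerge : mergeTwoBlobs (n0 :: n1 :: n2 :: nt2) (n0 :: n1 :: o2 :: ot2)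
          = [n0, n1, n2 + o2] := by
        simp [mergeTwoBlobs, PySem.List.pyGetD, PySem.List.pyGet?_zero_cons, pyGet_one_cons,
          pyGet_two_cons]
      have hpre' : Pre_update_observed_blobs [n0, n1, n2 + o2] rest := by
        intro b hb
        obtain ⟨_, hb0, hb1, hb2⟩ := hpre b (by simp [hb])
        refine ⟨by simp, hb0, ?_, ?_⟩
        · intro ht; exact ⟨by simp, (hb1 ht).2⟩
        · intro _ ht; exact ⟨by simp, (hb2 (by simp) ht).2⟩
      have ihm := ih [n0, n1, n2 + o2] hpre'
      rw [hA, hmerge, ihm]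
      -- the merged blob selects the same blobs of rest as new_blob does
      have hsame : (fun b => positionsEqualB [n0, n1, n2 + o2] b)
          = (fun b => positionsEqualB (n0 :: n1 :: n2 :: nt2) b) := by
        funext b; rw [posEqB_cons2, posEqB_cons2]
      have hpB : positionsEqualB (n0 :: n1 :: n2 :: nt2) (n0 :: n1 :: o2 :: ot2) = true := hp
      simp only [update_observed_blobs_alt, List.filter_cons]
      rw [show (fun b => !positionsEqualB [n0, n1, n2 + o2] b)
            = (fun b => !positionsEqualB (n0 :: n1 :: n2 :: nt2) b) by
          funext b; rw [congrFun hsame b]]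
      rw [hsame]
      simp only [hpB, Bool.not_true, Bool.false_eq_true, if_false, if_true, List.isEmpty_cons]
      rcases hM : (List.filter (fun b => positionsEqualB (n0 :: n1 :: n2 :: nt2) b) rest).isEmpty with _ | _
      · -- rest has further matches
        rw [List.isEmpty_eq_false_iff] at hM
        simp only [if_false, Bool.false_eq_true]
        simp only [List.map_cons, List.sum_cons, PySem.List.pyGetD,
          PySem.List.pyGet?_zero_cons, pyGet_one_cons, pyGet_two_cons, Option.getD_some]
        simp [add_assoc]
      · -- the merged blob is the only match
        rw [List.isEmpty_iff] at hM
        simp [hM, PySem.List.pyGetD, PySem.List.pyGet?_zero_cons, pyGet_one_cons, pyGet_two_cons]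
    · -- no-match case
      have hp' : positionsEqual new o = false := by
        cases h : positionsEqual new o with
        | true => exact absurd h hp
        | false => rfl
      have hAc : update_observed_blobs new (o :: rest) = o :: update_observed_blobs new rest := by
        simp [update_observed_blobs, hp']
      rw [hAc, ih new hrest, ← alt_cons_no_match new o rest hp']

-- ===== VERDICT (by name: the statement is the Claim_ definition above) =====
theorem update_observed_blobs_spec : Claim_equal_update_observed_blobs := by
  intro new obs _ hpre
  unfold Spec_update_observed_blobs
  exact main_equiv obs new hpre
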